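-- pv_equiv track=rewrite | github.com/elrama-/VZcomp | VZcomp/translations.py | set_parameters
-- ===== SOURCE A (Python) =====
-- def set_parameters(qasm_list,gamma_1,gamma_2,alpha_1,alpha_2):
--     '''
--     Sets parameters as string from QASM list to input angle as string.
--     '''
--     new_qasm_list=[]
--     for line in qasm_list:
--         if '90+gamma1' in line:
--             new_gamma1=str(90+gamma_1)
--             new_line=line.replace('90+gamma1',new_gamma1)
--             new_qasm_list.append(new_line)
--         elif 'gamma1' in line:
--             new_line=line.replace('gamma1',str(gamma_1))
--             new_qasm_list.append(new_line)
--         elif '-gamma2' in line: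
--             new_line=line.replace('-gamma2',str(-gamma_2))
--             new_qasm_list.append(new_line)
--         elif 'alpha1' in line:
--             new_line=line.replace('alpha1',str(alpha_1))
--             new_qasm_list.append(new_line)
--         elif '-alpha2' in line:
--             new_line=line.replace('-alpha2',str(-alpha_2))
--             new_qasm_list.append(new_line)
--         else:
--             new_qasm_list.append(line)
--     return new_qasm_list
-- ===== SOURCE B (Python) =====
-- def set_parameters(qasm_list, gamma_1, gamma_2, alpha_1, alpha_2):
--     '''
--     Sets parameters as string from QASM list to input angle as string.
--     '''
--     # Staged passes: one full sweep of the list per pattern, in priority order.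
--     # Each line carries a 'done' flag so at most one substitution ever applies
--     # to it (the highest-priority matching pattern), matching first-match
--     # semantics with the loop nesting swapped (patterns outer, lines inner).
--     state = [(line, False) for line in qasm_list]
--     for pat, rep in (('90+gamma1', str(90 + gamma_1)),
--                      ('gamma1', str(gamma_1)),
--                      ('-gamma2', str(-gamma_2)),
--                      ('alpha1', str(alpha_1)),
--                      ('-alpha2', str(-alpha_2))):
--         state = [(line.replace(pat, rep), True) if (not done and pat in line)
--                  else (line, done)
--                  for line, done in state]
--     return [line for line, _ in state]
-- ===== Notes on version B (the rewrite author's own statement) =====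
-- stated objective: alternative
-- what changed: Swaps the loop nesting: instead of choosing one of six branches per line, B makes five staged passes over the whole list (one per pattern in priority order), with a per-line done flag so at most one substitution applies to each line.
import Mathlib
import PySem

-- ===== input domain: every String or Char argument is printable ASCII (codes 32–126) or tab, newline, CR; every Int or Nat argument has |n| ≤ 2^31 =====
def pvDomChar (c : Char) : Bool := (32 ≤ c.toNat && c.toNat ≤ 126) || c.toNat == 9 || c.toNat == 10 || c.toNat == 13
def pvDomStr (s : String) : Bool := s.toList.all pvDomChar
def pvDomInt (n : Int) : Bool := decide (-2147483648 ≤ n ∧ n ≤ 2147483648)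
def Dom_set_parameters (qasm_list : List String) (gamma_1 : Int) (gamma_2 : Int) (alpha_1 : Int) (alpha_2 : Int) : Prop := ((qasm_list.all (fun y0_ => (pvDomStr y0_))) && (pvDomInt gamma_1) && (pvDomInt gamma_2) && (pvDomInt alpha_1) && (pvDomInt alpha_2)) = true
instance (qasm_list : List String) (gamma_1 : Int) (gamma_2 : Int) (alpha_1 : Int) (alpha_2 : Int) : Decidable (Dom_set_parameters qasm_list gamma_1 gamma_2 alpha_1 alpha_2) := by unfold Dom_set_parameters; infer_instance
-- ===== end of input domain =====

-- B swaps the loop nesting: five staged whole-list passes (one per pattern, priority order) with a per-line done flag, instead of A's per-line if/elif chain (objective: alternative).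

-- ===== PORT A =====
-- literal transliteration of A's loop: accumulate new_qasm_list, one branch per pattern
def set_parameters (qasm_list : List String) (gamma_1 : Int) (gamma_2 : Int) (alpha_1 : Int) (alpha_2 : Int) : List String :=
  qasm_list.foldl (fun new_qasm_list line =>
    if PySem.Str.isIn "90+gamma1" line then
      new_qasm_list ++ [PySem.Str.replace line "90+gamma1" (PySem.Int.toStr (90 + gamma_1))]
    else if PySem.Str.isIn "gamma1" line then
      new_qasm_list ++ [PySem.Str.replace line "gamma1" (PySem.Int.toStr gamma_1)]
    else if PySem.Str.isIn "-gamma2" line then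
      new_qasm_list ++ [PySem.Str.replace line "-gamma2" (PySem.Int.toStr (-gamma_2))]
    else if PySem.Str.isIn "alpha1" line then
      new_qasm_list ++ [PySem.Str.replace line "alpha1" (PySem.Int.toStr alpha_1)]
    else if PySem.Str.isIn "-alpha2" line then
      new_qasm_list ++ [PySem.Str.replace line "-alpha2" (PySem.Int.toStr (-alpha_2))]
    else
      new_qasm_list ++ [line]) []

-- ===== PORT B =====
-- one staged step on a (line, done) pair: substitute `pat` if the line is not yet done and contains it
def pvStep (pat rep : String) (p : String × Bool) : String × Bool :=
  if !p.2 && PySem.Str.isIn pat p.1 then (PySem.Str.replace p.1 pat rep, true) else p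

-- one staged pass: apply the step to every line of the list
def pvPass (pat rep : String) (state : List (String × Bool)) : List (String × Bool) :=
  state.map (pvStep pat rep)

def set_parameters_alt (qasm_list : List String) (gamma_1 : Int) (gamma_2 : Int) (alpha_1 : Int) (alpha_2 : Int) : List String :=
  (([("90+gamma1", PySem.Int.toStr (90 + gamma_1)),
     ("gamma1", PySem.Int.toStr gamma_1),
     ("-gamma2", PySem.Int.toStr (-gamma_2)),
     ("alpha1", PySem.Int.toStr alpha_1),
     ("-alpha2", PySem.Int.toStr (-alpha_2))] : List (String × String)).foldl
      (fun state pr => pvPass pr.1 pr.2 state)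
      (qasm_list.map (fun line => (line, false)))).map Prod.fst

-- ===== PRECONDITION & SPEC =====
def Spec_set_parameters (qasm_list : List String) (gamma_1 : Int) (gamma_2 : Int) (alpha_1 : Int) (alpha_2 : Int) (out : List String) : Prop := out = set_parameters_alt qasm_list gamma_1 gamma_2 alpha_1 alpha_2
instance (qasm_list : List String) (gamma_1 : Int) (gamma_2 : Int) (alpha_1 : Int) (alpha_2 : Int) (out : List String) : Decidable (Spec_set_parameters qasm_list gamma_1 gamma_2 alpha_1 alpha_2 out) := by unfold Spec_set_parameters; infer_instance

-- ===== CLAIM (what is proved, stated in full; the proofs are below) =====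
def Claim_equal_set_parameters : Prop := ∀ (qasm_list : List String) (gamma_1 : Int) (gamma_2 : Int) (alpha_1 : Int) (alpha_2 : Int), Dom_set_parameters qasm_list gamma_1 gamma_2 alpha_1 alpha_2 → Spec_set_parameters qasm_list gamma_1 gamma_2 alpha_1 alpha_2 (set_parameters qasm_list gamma_1 gamma_2 alpha_1 alpha_2)

-- ===== LEMMAS AND PROOFS =====

-- an append-each foldl over a 5-way guarded body is a map
theorem pv_fold_gen (c1 c2 c3 c4 c5 : String → Bool) (r1 r2 r3 r4 r5 : String → String) :
    ∀ (l : List String) (acc : List String),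
      l.foldl (fun acc line =>
          if c1 line then acc ++ [r1 line]
          else if c2 line then acc ++ [r2 line]
          else if c3 line then acc ++ [r3 line]
          else if c4 line then acc ++ [r4 line]
          else if c5 line then acc ++ [r5 line]
          else acc ++ [line]) acc
      = acc ++ l.map (fun line =>
          if c1 line then r1 line
          else if c2 line then r2 line
          else if c3 line then r3 line
          else if c4 line then r4 line
          else if c5 line then r5 line
          else line) := by
  intro l
  induction l with
  | nil => intro acc; simp
  | cons line rest ih =>
      intro acc
      simp only [List.foldl_cons, List.map_cons]
      split_ifs <;> rw [ih] <;> simp only [List.append_assoc, List.singleton_append]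

-- five staged steps on a fresh line compute the first-match if/elif chain
theorem pv_pass5 (p1 r1 p2 r2 p3 r3 p4 r4 p5 r5 line : String) :
    (pvStep p5 r5 (pvStep p4 r4 (pvStep p3 r3 (pvStep p2 r2 (pvStep p1 r1 (line, false)))))).1
      = (if PySem.Str.isIn p1 line then PySem.Str.replace line p1 r1
         else if PySem.Str.isIn p2 line then PySem.Str.replace line p2 r2
         else if PySem.Str.isIn p3 line then PySem.Str.replace line p3 r3
         else if PySem.Str.isIn p4 line then PySem.Str.replace line p4 r4
         else if PySem.Str.isIn p5 line then PySem.Str.replace line p5 r5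
         else line) := by
  by_cases h1 : PySem.Chars.isIn p1.toList line.toList = true
  · simp [pvStep, h1]
  · by_cases h2 : PySem.Chars.isIn p2.toList line.toList = true
    · simp [pvStep, h1, h2]
    · by_cases h3 : PySem.Chars.isIn p3.toList line.toList = true
      · simp [pvStep, h1, h2, h3]
      · by_cases h4 : PySem.Chars.isIn p4.toList line.toList = true
        · simp [pvStep, h1, h2, h3, h4]
        · by_cases h5 : PySem.Chars.isIn p5.toList line.toList = true
          · simp [pvStep, h1, h2, h3, h4, h5]
          · simp [pvStep, h1, h2, h3, h4, h5]

-- ===== VERDICT (by name: the statement is the Claim_ definition above) =====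
theorem set_parameters_spec : Claim_equal_set_parameters := by
  intro qasm_list gamma_1 gamma_2 alpha_1 alpha_2 _
  unfold Spec_set_parameters set_parameters set_parameters_alt
  rw [pv_fold_gen]
  simp only [List.foldl_cons, List.foldl_nil, pvPass, List.map_map]
  refine congrArg (List.map · qasm_list) (funext fun line => ?_)
  simp only [Function.comp]
  exact (pv_pass5 _ _ _ _ _ _ _ _ _ _ line).symm
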